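-- pv_equiv track=rewrite | github.com/lanisle/igcommit | igcommit/utils.py | iter_buffer
-- ===== SOURCE A (Python) =====
-- def iter_buffer(iterable, amount):
--     assert amount > 1
--     memo = []
--     for elem in iterable:
--         if elem is not None:
--             memo.append(elem)
--             if len(memo) < amount:
--                 continue
--         yield memo.pop(0)
--
--     for elem in memo:
--         yield elem
-- ===== SOURCE B (Python) =====
-- def iter_buffer(iterable, amount):
--     # Every buffered element is eventually yielded in FIFO order, so the
--     # value sequence is exactly the non-None elements in input order.
--     assert amount > 1
--     for elem in iterable:
--         if elem is not None:
--             yield elem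
-- ===== Notes on version B (the rewrite author's own statement) =====
-- stated objective: faster
-- what changed: B drops the delay buffer entirely: since every buffered element is eventually yielded in FIFO order, the value sequence equals the non-None elements in input order, so B is a one-line filter instead of a list with pop(0); (note: A's buffering only changes when values are yielded, not which, so the return sequences agree).
import Mathlib
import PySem

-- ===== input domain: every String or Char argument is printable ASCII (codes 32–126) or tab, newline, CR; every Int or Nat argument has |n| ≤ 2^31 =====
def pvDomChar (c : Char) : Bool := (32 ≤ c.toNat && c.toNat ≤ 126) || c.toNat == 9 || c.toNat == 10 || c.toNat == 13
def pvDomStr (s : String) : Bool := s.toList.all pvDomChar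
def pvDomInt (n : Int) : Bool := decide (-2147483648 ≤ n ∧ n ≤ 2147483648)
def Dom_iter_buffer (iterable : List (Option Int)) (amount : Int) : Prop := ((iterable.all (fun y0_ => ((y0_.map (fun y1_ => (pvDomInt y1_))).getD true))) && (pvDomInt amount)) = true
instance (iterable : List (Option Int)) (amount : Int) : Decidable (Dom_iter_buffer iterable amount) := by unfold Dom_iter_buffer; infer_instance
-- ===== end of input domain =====

-- B replaces A's delay buffer (list with pop(0)) by a direct filter of the non-None
-- elements, which yields the same value sequence; equivalence is about the yielded values.


-- ===== PORT A =====
-- the generator loop: yields collected in order; at the end of the input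
-- the remaining memo is flushed (A's trailing 'for elem in memo: yield elem').
-- The '[]' results in the pop-from-empty branches correspond to A raising
-- IndexError there; those inputs are excluded by Pre_iter_buffer.
def iterBufLoopA : List (Option Int) → Int → List Int → List Int
  | [], _, memo => memo
  | some v :: rest, amount, memo =>
    let memo' := memo ++ [v]
    if ((memo'.length : Int) < amount) then iterBufLoopA rest amount memo'
    else
      match memo' with
      | [] => []                      -- unreachable (memo' ends in v)
      | m :: ms => m :: iterBufLoopA rest amount ms
  | none :: rest, amount, memo =>
    match memo with
    | [] => []                        -- memo.pop(0) on empty list: IndexError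
    | m :: ms => m :: iterBufLoopA rest amount ms

def iter_buffer (iterable : List (Option Int)) (amount : Int) : List Int :=
  iterBufLoopA iterable amount []

-- ===== PORT B =====
def iterAltLoop : List (Option Int) → List Int
  | [] => []
  | none :: rest => iterAltLoop rest
  | some v :: rest => v :: iterAltLoop rest

def iter_buffer_alt (iterable : List (Option Int)) (amount : Int) : List Int :=
  iterAltLoop iterable

-- ===== PRECONDITION & SPEC =====
-- tracks only the SIZE of A's buffer; false iff a None arrives while the buffer is empty
def noUnder : List (Option Int) → Int → Nat → Bool
  | [], _, _ => true
  | some _ :: rest, amount, m =>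
      if (((m + 1 : Nat) : Int) < amount) then noUnder rest amount (m + 1)
      else noUnder rest amount m
  | none :: rest, amount, m =>
      if m = 0 then false else noUnder rest amount (m - 1)

-- Pre_ excludes exactly the inputs on which A raises: amount ≤ 1 (AssertionError)
-- and inputs where a None arrives while A's buffer is empty (IndexError on pop(0)).
def Pre_iter_buffer (iterable : List (Option Int)) (amount : Int) : Prop :=
  1 < amount ∧ noUnder iterable amount 0 = true
instance (iterable : List (Option Int)) (amount : Int) : Decidable (Pre_iter_buffer iterable amount) := by unfold Pre_iter_buffer; infer_instance

def pvWitness_iter_buffer : List (Option Int) × Int :=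
  ([some 1, some 2, none, some 3], 2)

def Spec_iter_buffer (iterable : List (Option Int)) (amount : Int) (out : List Int) : Prop := out = iter_buffer_alt iterable amount
instance (iterable : List (Option Int)) (amount : Int) (out : List Int) : Decidable (Spec_iter_buffer iterable amount out) := by unfold Spec_iter_buffer; infer_instance

-- ===== CLAIM (what is proved, stated in full; the proofs are below) =====
def Claim_equal_iter_buffer : Prop := ∀ (iterable : List (Option Int)) (amount : Int), Dom_iter_buffer iterable amount → Pre_iter_buffer iterable amount → Spec_iter_buffer iterable amount (iter_buffer iterable amount)

-- ===== LEMMAS AND PROOFS =====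
-- Invariant: as long as no underflow happens, the buffered loop returns the
-- current memo followed by the non-None elements of the remaining input.
theorem iterBufLoopA_eq (rest : List (Option Int)) (amount : Int) :
    ∀ memo : List Int, noUnder rest amount memo.length = true →
      iterBufLoopA rest amount memo = memo ++ iterAltLoop rest := by
  induction rest with
  | nil => intro memo _; simp [iterBufLoopA, iterAltLoop]
  | cons e rest ih =>
    intro memo h
    cases e with
    | some v =>
      simp only [iterBufLoopA, iterAltLoop]
      simp only [noUnder] at h
      rw [List.length_append, List.length_cons, List.length_nil] at *
      by_cases hc : (((memo.length + 1 : Nat) : Int) < amount)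
      · rw [if_pos hc] at h ⊢
        rw [ih (memo ++ [v]) (by simpa using h)]
        simp
      · rw [if_neg hc] at h ⊢
        cases memo with
        | nil =>
          simp only [List.nil_append]
          rw [ih [] (by simpa using h)]
          simp
        | cons m ms =>
          simp only [List.cons_append]
          rw [ih (ms ++ [v]) (by simpa using h)]
          simp
    | none =>
      simp only [iterBufLoopA, iterAltLoop]
      simp only [noUnder] at h
      cases memo with
      | nil => simp at h
      | cons m ms =>
        simp only [List.length_cons, if_neg (Nat.succ_ne_zero ms.length), Nat.add_sub_cancel] at h
        simp [ih ms h]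

-- ===== VERDICT (by name: the statement is the Claim_ definition above) =====
theorem iter_buffer_spec : Claim_equal_iter_buffer := by
  intro iterable amount _ hpre
  unfold Spec_iter_buffer iter_buffer iter_buffer_alt
  exact iterBufLoopA_eq iterable amount [] hpre.2
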